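-- pv_equiv track=rewrite | github.com/deLimaNicolas/exercises | 3176/solution.py | maximumLength_removed
-- ===== SOURCE A (Python) =====
-- from typing import List
--
-- def maximumLength_removed(nums: List[int], k: int) -> int:
--     if not nums:
--         return 0
--     tagged = set()
--     res = 1
--     l = 0
--     for r in range(1, len(nums)):
--         if nums[r] != nums[r - 1]:
--             tagged.add(r - 1)
--         while len(tagged) > k:
--             tagged.discard(l)
--             l += 1
--         res = max(res, r - l + 1)
--
--     return res
-- ===== SOURCE B (Python) =====
-- from typing import List
--
-- def maximumLength_removed(nums: List[int], k: int) -> int: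
--     # Run-length encoding: the best window ending at the end of run j takes the
--     # last min(j+1, k+1) runs wholly, so a single sliding sum over run lengths suffices.
--     if not nums:
--         return 0
--     runs = []
--     cnt = 1
--     for i in range(1, len(nums)):
--         if nums[i] == nums[i - 1]:
--             cnt += 1
--         else:
--             runs.append(cnt)
--             cnt = 1
--     runs.append(cnt)
--     s = 0
--     best = 0
--     for j in range(len(runs)):
--         s += runs[j]
--         if j > k:
--             s -= runs[j - k - 1]
--         if s > best:
--             best = s
--     return best
-- ===== Notes on version B (the rewrite author's own statement) =====
-- stated objective: alternative
-- what changed: Replaces the index-level two-pointer sliding window that maintains a set of transition indices by a run-length encoding of nums followed by a single sliding sum over at most k+1 consecutive run lengths.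
-- outside the precondition, e.g. on maximumLength_removed([5], -1): A returns 1, B returns 0
import Mathlib
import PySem

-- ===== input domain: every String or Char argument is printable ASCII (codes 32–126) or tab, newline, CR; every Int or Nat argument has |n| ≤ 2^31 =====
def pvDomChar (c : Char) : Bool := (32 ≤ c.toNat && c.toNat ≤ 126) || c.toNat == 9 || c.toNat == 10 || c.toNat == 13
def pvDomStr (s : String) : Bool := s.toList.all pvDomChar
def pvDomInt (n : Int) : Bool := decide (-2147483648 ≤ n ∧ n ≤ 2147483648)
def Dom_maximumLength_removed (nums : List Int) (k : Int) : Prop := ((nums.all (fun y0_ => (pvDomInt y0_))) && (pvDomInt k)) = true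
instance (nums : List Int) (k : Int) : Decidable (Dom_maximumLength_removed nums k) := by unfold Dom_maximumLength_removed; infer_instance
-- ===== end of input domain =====

-- B replaces A's index-level two-pointer window with a set of transition indices by a
-- run-length encoding of nums followed by one sliding sum over at most k+1 run lengths
-- (no per-element set maintenance; measurably faster by a constant factor).

-- ===== PORT A =====
-- the 'while len(tagged) > k: tagged.discard(l); l += 1' loop; fuel = len(nums) suffices
-- on every input admitted by Pre_ (0 ≤ k): the set only holds indices in [l, r).
def pvPopLoop (k : Int) : Nat → PySem.Set Int → Int → PySem.Set Int × Int
  | 0, tagged, l => (tagged, l)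
  | fuel+1, tagged, l =>
    if PySem.Set.len tagged > k then pvPopLoop k fuel (PySem.Set.discard tagged l) (l+1)
    else (tagged, l)

-- one iteration of A's 'for r in range(1, len(nums))' body; state = (tagged, res, l)
def pvStepA (nums : List Int) (k : Int) (st : PySem.Set Int × Int × Int) (r : Int) :
    PySem.Set Int × Int × Int :=
  let tagged := if PySem.List.pyGet? nums r ≠ PySem.List.pyGet? nums (r-1)
                then PySem.Set.add st.1 (r-1) else st.1
  let tl := pvPopLoop k nums.length tagged st.2.2
  (tl.1, max st.2.1 (r - tl.2 + 1), tl.2)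

def maximumLength_removed (nums : List Int) (k : Int) : Int :=
  if nums = [] then 0
  else ((PySem.List.pyRange 1 (nums.length : Int) 1).foldl (pvStepA nums k)
          (PySem.Set.empty, 1, 0)).2.1

-- ===== PORT B =====
-- one iteration of B's run-length-encoding loop; state = (runs, cnt)
def pvStepRuns (nums : List Int) (st : List Int × Int) (i : Int) : List Int × Int :=
  if PySem.List.pyGet? nums i = PySem.List.pyGet? nums (i-1) then (st.1, st.2 + 1)
  else (st.1 ++ [st.2], 1)

-- one iteration of B's sliding-sum loop over the run lengths; state = (s, best)
def pvStepBest (runs : List Int) (k : Int) (st : Int × Int) (j : Int) : Int × Int :=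
  let s := st.1 + PySem.List.pyGetD runs j 0
  let s := if j > k then s - PySem.List.pyGetD runs (j - k - 1) 0 else s
  (s, if s > st.2 then s else st.2)

def maximumLength_removed_alt (nums : List Int) (k : Int) : Int :=
  if nums = [] then 0
  else
    let rc := (PySem.List.pyRange 1 (nums.length : Int) 1).foldl (pvStepRuns nums) ([], 1)
    let runs := rc.1 ++ [rc.2]
    ((PySem.List.pyRange 0 (runs.length : Int) 1).foldl (pvStepBest runs k) (0, 0)).2

-- ===== PRECONDITION & SPEC =====
-- Pre_ excludes negative k, which is outside the function's natural domain: there A loops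
-- forever whenever nums has at least two elements, and on single-element lists A returns 1
-- while B returns 0 (no window has at most a negative number of transitions) — both
-- defensible answers to a question nobody would specify.
def Pre_maximumLength_removed (nums : List Int) (k : Int) : Prop := 0 ≤ k
instance (nums : List Int) (k : Int) : Decidable (Pre_maximumLength_removed nums k) := by
  unfold Pre_maximumLength_removed; infer_instance

def pvWitness_maximumLength_removed : List Int × Int := ([1, 1, 2], 1)

def Spec_maximumLength_removed (nums : List Int) (k : Int) (out : Int) : Prop :=
  out = maximumLength_removed_alt nums k
instance (nums : List Int) (k : Int) (out : Int) :
    Decidable (Spec_maximumLength_removed nums k out) := by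
  unfold Spec_maximumLength_removed; infer_instance

-- ===== CLAIM (what is proved, stated in full; the proofs are below) =====
def Claim_equal_maximumLength_removed : Prop :=
  ∀ (nums : List Int) (k : Int), Dom_maximumLength_removed nums k →
    Pre_maximumLength_removed nums k →
    Spec_maximumLength_removed nums k (maximumLength_removed nums k)

-- ===== LEMMAS AND PROOFS =====

-- transition test between positions i and i+1 of nums
def pvT (nums : List Int) (i : Nat) : Bool :=
  decide (PySem.List.pyGet? nums ((i:Int)+1) ≠ PySem.List.pyGet? nums (i:Int))

-- boundary indices (last index of each non-final run) among [0, r)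
def pvBsr (nums : List Int) (r : Nat) : List Nat := (List.range r).filter (pvT nums)

-- start index of run j, read off a boundary list
def pvP (bs : List Nat) (j : Nat) : Nat := if j = 0 then 0 else bs.getD (j-1) 0 + 1
-- end index of run j (the last run ends at n-1)
def pvE (bs : List Nat) (n j : Nat) : Nat := if j = bs.length then n - 1 else bs.getD j 0
-- length of the best window ending at the end of run j (covers runs j-k' .. j wholly)
def pvW (bs : List Nat) (n k' j : Nat) : Int :=
  (pvE bs n j : Int) - (pvP bs (j - k') : Int) + 1
-- running maximum of pvW over runs 0 .. j-1, seeded with A's initial res = 1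
def pvWP (bs : List Nat) (n k' : Nat) : Nat → Int
  | 0 => 1
  | j+1 => max (pvWP bs n k' j) (pvW bs n k' j)
-- length of run j
def pvRL (bs : List Nat) (n j : Nat) : Int := (pvE bs n j : Int) - (pvP bs j : Int) + 1

def pvC (nums : List Int) (r : Nat) : Nat := (pvBsr nums r).length
def pvLo (nums : List Int) (k' r : Nat) : Nat := pvP (pvBsr nums r) (pvC nums r - k')
def pvTag (nums : List Int) (k' r : Nat) : List Int :=
  ((pvBsr nums r).drop (pvC nums r - k')).map (fun i : Nat => (i : Int))
def pvResA (nums : List Int) (k' : Nat) : Nat → Int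
  | 0 => 1
  | r+1 => max (pvResA nums k' r) (((r:Int)+1) - (pvLo nums k' (r+1) : Int) + 1)

theorem pvBsr_succ (nums : List Int) (r : Nat) :
    pvBsr nums (r+1) = pvBsr nums r ++ (if pvT nums r then [r] else []) := by
  unfold pvBsr
  rw [List.range_succ, List.filter_append]
  cases h : pvT nums r <;> simp [List.filter, h]

theorem pvBsr_lt {nums : List Int} {r i : Nat} (h : i ∈ pvBsr nums r) : i < r := by
  unfold pvBsr at h
  simp only [List.mem_filter, List.mem_range] at h
  exact h.1

theorem pvBsr_pairwise (nums : List Int) (r : Nat) : (pvBsr nums r).Pairwise (· < ·) :=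
  List.Pairwise.filter _ List.pairwise_lt_range

theorem pvBsr_prefix (nums : List Int) {r r' : Nat} (h : r ≤ r') :
    pvBsr nums r <+: pvBsr nums r' := by
  unfold pvBsr
  refine List.IsPrefix.filter _ ?_
  rw [show r' = r + (r' - r) by omega, List.range_add]
  exact List.prefix_append _ _

theorem pv_getD_of_prefix {l1 l2 : List Nat} (h : l1 <+: l2) {j : Nat}
    (hj : j < l1.length) : l2.getD j 0 = l1.getD j 0 := by
  obtain ⟨t, rfl⟩ := h
  exact List.getD_append _ _ _ _ hj

theorem pvBsr_getD (nums : List Int) {r r' j : Nat} (hrr : r ≤ r') (hj : j < pvC nums r) :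
    (pvBsr nums r').getD j 0 = (pvBsr nums r).getD j 0 :=
  pv_getD_of_prefix (pvBsr_prefix nums hrr) hj

theorem pvP_agree (nums : List Int) {r r' j : Nat} (hrr : r ≤ r') (hj : j ≤ pvC nums r) :
    pvP (pvBsr nums r') j = pvP (pvBsr nums r) j := by
  unfold pvP
  cases j with
  | zero => rfl
  | succ j => simp only [Nat.succ_ne_zero, if_false, Nat.add_sub_cancel]
              rw [pvBsr_getD nums hrr (by omega)]

theorem pvBsr_getD_lt (nums : List Int) (r : Nat) {i j : Nat} (hij : i < j)
    (hj : j < pvC nums r) :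
    (pvBsr nums r).getD i 0 < (pvBsr nums r).getD j 0 := by
  have hp := pvBsr_pairwise nums r
  have hj' : j < (pvBsr nums r).length := hj
  rw [List.getD_eq_getElem _ _ (by omega), List.getD_eq_getElem _ _ hj']
  exact List.pairwise_iff_getElem.1 hp i j (by omega) hj' hij

theorem pvC_mono (nums : List Int) {r r' : Nat} (h : r ≤ r') : pvC nums r ≤ pvC nums r' :=
  List.IsPrefix.length_le (pvBsr_prefix nums h)

theorem pvRL_agree (nums : List Int) (n : Nat) {r r' j : Nat} (hrr : r ≤ r')
    (hj : j < pvC nums r) :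
    pvRL (pvBsr nums r') n j = pvRL (pvBsr nums r) n j := by
  have hle : pvC nums r ≤ pvC nums r' := pvC_mono nums hrr
  unfold pvRL pvE
  rw [if_neg (show j ≠ (pvBsr nums r').length by have : pvC nums r' = (pvBsr nums r').length := rfl; omega),
      if_neg (show j ≠ (pvBsr nums r).length by have : pvC nums r = (pvBsr nums r).length := rfl; omega),
      pvBsr_getD nums hrr hj, pvP_agree nums hrr (by omega)]

theorem pvBsr_getD_last (nums : List Int) {r : Nat} (hb : pvT nums r = true) :
    (pvBsr nums (r+1)).getD (pvC nums r) 0 = r := by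
  have hbsr : pvBsr nums (r+1) = pvBsr nums r ++ [r] := by rw [pvBsr_succ]; simp [hb]
  have hlen : pvC nums r < (pvBsr nums (r+1)).length := by
    rw [hbsr, List.length_append]
    simp [pvC]
  rw [List.getD_eq_getElem _ _ hlen]
  simp only [hbsr]
  exact List.getElem_concat_length rfl _

theorem pvPopLoop_le (k : Int) (fuel : Nat) (tagged : PySem.Set Int) (l : Int)
    (h : ¬ PySem.Set.len tagged > k) : pvPopLoop k fuel tagged l = (tagged, l) := by
  cases fuel with
  | zero => rfl
  | succ m => simp only [pvPopLoop]; rw [if_neg h]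

theorem pvPopLoop_pop (k x : Int) (xs : List Int)
    (hxs : ∀ y ∈ xs, x < y) (hgt : k < ((x :: xs).length : Int))
    (hle : (xs.length : Int) ≤ k) :
    ∀ (fuel : Nat) (l : Int), l ≤ x → (x - l).toNat < fuel →
      pvPopLoop k fuel (x :: xs) l = (xs, x + 1) := by
  intro fuel
  induction fuel with
  | zero => intro l _ h; omega
  | succ fuel ih =>
    intro l hlx hfuel
    have hlen : PySem.Set.len (x :: xs) > k := by
      simpa [PySem.Set.len] using hgt
    simp only [pvPopLoop, if_pos hlen]
    by_cases hl : l = x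
    · have hdis : PySem.Set.discard (x :: xs) l = xs := by
        rw [hl]
        simp only [PySem.Set.discard, List.filter_cons, BEq.rfl, Bool.not_true, Bool.false_eq_true, if_false]
        rw [List.filter_eq_self]
        intro y hy
        simpa using (hxs y hy).ne'
      rw [hdis, hl]
      exact pvPopLoop_le _ _ _ _ (by simp [PySem.Set.len]; omega)
    · have hlt : l < x := lt_of_le_of_ne hlx hl
      have hdis : PySem.Set.discard (x :: xs) l = x :: xs := by
        simp only [PySem.Set.discard]
        rw [List.filter_eq_self]
        intro y hy
        rcases List.mem_cons.1 hy with rfl | hy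
        · simpa using (by omega : y ≠ l)
        · simpa using (by have := hxs y hy; omega : y ≠ l)
      rw [hdis]
      exact ih (l+1) (by omega) (by omega)

theorem pv_stepA_eq (nums : List Int) (k : Int) (hk : 0 ≤ k) (r : Nat)
    (hr : r + 1 ≤ nums.length - 1) :
    pvStepA nums k (pvTag nums k.toNat r, pvResA nums k.toNat r, (pvLo nums k.toNat r : Int))
        ((r:Int)+1)
      = (pvTag nums k.toNat (r+1), pvResA nums k.toNat (r+1), (pvLo nums k.toNat (r+1) : Int)) := by
  have hkk : (k.toNat : Int) = k := Int.toNat_of_nonneg hk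
  have hCr : pvC nums r = (pvBsr nums r).length := rfl
  simp only [pvStepA]
  rw [show (r:Int)+1-1 = (r:Int) by ring]
  by_cases hb : pvT nums r = true
  · have hcond : PySem.List.pyGet? nums ((r:Int)+1) ≠ PySem.List.pyGet? nums (r:Int) := by
      simpa [pvT] using hb
    rw [if_pos hcond]
    have hbsr : pvBsr nums (r+1) = pvBsr nums r ++ [r] := by rw [pvBsr_succ]; simp [hb]
    have hC1 : pvC nums (r+1) = pvC nums r + 1 := by simp [pvC, hbsr]
    have hC1' : (pvBsr nums (r+1)).length = pvC nums r + 1 := hC1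
    have hnm : ((r:Nat):Int) ∉ pvTag nums k.toNat r := by
      intro hmem
      unfold pvTag at hmem
      obtain ⟨i, hi, hcast⟩ := List.mem_map.1 hmem
      have hilt : i < r := pvBsr_lt (List.mem_of_mem_drop hi)
      omega
    rw [PySem.Set.add_of_not_mem hnm]
    have htag : pvTag nums k.toNat r ++ [((r:Nat):Int)]
        = ((pvBsr nums (r+1)).drop (pvC nums r - k.toNat)).map (fun i : Nat => (i : Int)) := by
      rw [hbsr, List.drop_append_of_le_length (by omega), List.map_append]
      rfl
    rw [htag]
    by_cases hck : pvC nums r < k.toNat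
    · have hlen2 : ¬ (PySem.Set.len
          (((pvBsr nums (r+1)).drop (pvC nums r - k.toNat)).map (fun i : Nat => (i : Int))) > k) := by
        simp only [PySem.Set.len, List.length_map, List.length_drop]
        omega
      rw [pvPopLoop_le _ _ _ _ hlen2]
      have htag2 : pvTag nums k.toNat (r+1)
          = ((pvBsr nums (r+1)).drop (pvC nums r - k.toNat)).map (fun i : Nat => (i : Int)) := by
        unfold pvTag
        rw [hC1, show pvC nums r + 1 - k.toNat = 0 by omega,
          show pvC nums r - k.toNat = 0 by omega]
      have hlo2 : pvLo nums k.toNat (r+1) = pvLo nums k.toNat r := by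
        unfold pvLo
        rw [hC1, show pvC nums r + 1 - k.toNat = 0 by omega,
          show pvC nums r - k.toNat = 0 by omega]
        simp [pvP]
      rw [htag2, show pvResA nums k.toNat (r+1) = max (pvResA nums k.toNat r)
            (((r:Int)+1) - (pvLo nums k.toNat (r+1) : Int) + 1) from rfl, hlo2]
    · have hck' : k.toNat ≤ pvC nums r := by omega
      have hdlt : pvC nums r - k.toNat < (pvBsr nums (r+1)).length := by omega
      rw [List.drop_eq_getElem_cons hdlt, List.map_cons]
      have hpwd : ((pvBsr nums (r+1)).drop (pvC nums r - k.toNat)).Pairwise (· < ·) :=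
        (pvBsr_pairwise nums (r+1)).drop
      rw [List.drop_eq_getElem_cons hdlt] at hpwd
      have hxlt : ∀ y ∈ ((pvBsr nums (r+1)).drop (pvC nums r - k.toNat + 1)).map
            (fun i : Nat => (i : Int)), ((pvBsr nums (r+1))[pvC nums r - k.toNat] : Int) < y := by
        intro y hy
        obtain ⟨i, hi, rfl⟩ := List.mem_map.1 hy
        exact_mod_cast (List.pairwise_cons.1 hpwd).1 i hi
      have hxr : (pvBsr nums (r+1))[pvC nums r - k.toNat] < r + 1 :=
        pvBsr_lt (List.getElem_mem hdlt)
      have hlor : pvLo nums k.toNat r ≤ (pvBsr nums (r+1))[pvC nums r - k.toNat] := by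
        unfold pvLo pvP
        by_cases hd0 : pvC nums r - k.toNat = 0
        · rw [if_pos hd0]; exact Nat.zero_le _
        · rw [if_neg hd0]
          have hgd1 : (pvBsr nums r).getD (pvC nums r - k.toNat - 1) 0
              = (pvBsr nums (r+1)).getD (pvC nums r - k.toNat - 1) 0 :=
            (pvBsr_getD nums (Nat.le_succ r) (by omega)).symm
          have hgd2 : (pvBsr nums (r+1)).getD (pvC nums r - k.toNat - 1) 0
              < (pvBsr nums (r+1)).getD (pvC nums r - k.toNat) 0 :=
            pvBsr_getD_lt nums (r+1) (by omega) (by rw [show pvC nums (r+1)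
              = (pvBsr nums (r+1)).length from rfl]; omega)
          have hgd3 : (pvBsr nums (r+1)).getD (pvC nums r - k.toNat) 0
              = (pvBsr nums (r+1))[pvC nums r - k.toNat] := List.getD_eq_getElem _ _ hdlt
          omega
      have hpop := pvPopLoop_pop k ((pvBsr nums (r+1))[pvC nums r - k.toNat] : Int)
        (((pvBsr nums (r+1)).drop (pvC nums r - k.toNat + 1)).map (fun i : Nat => (i : Int)))
        hxlt
        (by simp only [List.length_cons, List.length_map, List.length_drop]; omega)
        (by simp only [List.length_map, List.length_drop]; omega)
        nums.length ((pvLo nums k.toNat r : Int))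
        (by exact_mod_cast hlor)
        (by omega)
      rw [hpop]
      have htag3 : pvTag nums k.toNat (r+1)
          = ((pvBsr nums (r+1)).drop (pvC nums r - k.toNat + 1)).map (fun i : Nat => (i : Int)) := by
        unfold pvTag
        rw [hC1, show pvC nums r + 1 - k.toNat = pvC nums r - k.toNat + 1 by omega]
      have hlo3 : (pvLo nums k.toNat (r+1) : Int)
          = ((pvBsr nums (r+1))[pvC nums r - k.toNat] : Int) + 1 := by
        unfold pvLo pvP
        rw [hC1, show pvC nums r + 1 - k.toNat = pvC nums r - k.toNat + 1 by omega]
        rw [if_neg (by omega), Nat.add_sub_cancel,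
          List.getD_eq_getElem _ _ hdlt]
        push_cast
        ring
      rw [htag3, show pvResA nums k.toNat (r+1) = max (pvResA nums k.toNat r)
            (((r:Int)+1) - (pvLo nums k.toNat (r+1) : Int) + 1) from rfl, hlo3]
  · have hcond : ¬ (PySem.List.pyGet? nums ((r:Int)+1) ≠ PySem.List.pyGet? nums (r:Int)) := by
      simpa [pvT] using hb
    rw [if_neg hcond]
    have hbsr : pvBsr nums (r+1) = pvBsr nums r := by rw [pvBsr_succ]; simp [hb]
    have hlen : ¬ (PySem.Set.len (pvTag nums k.toNat r) > k) := by
      simp only [pvTag, PySem.Set.len, List.length_map, List.length_drop]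
      omega
    rw [pvPopLoop_le _ _ _ _ hlen]
    have h1 : pvTag nums k.toNat (r+1) = pvTag nums k.toNat r := by
      unfold pvTag pvC; rw [hbsr]
    have h2 : pvLo nums k.toNat (r+1) = pvLo nums k.toNat r := by
      unfold pvLo pvC; rw [hbsr]
    rw [h1, show pvResA nums k.toNat (r+1) = max (pvResA nums k.toNat r)
          (((r:Int)+1) - (pvLo nums k.toNat (r+1) : Int) + 1) from rfl, h2]

theorem pv_loopA_inv (nums : List Int) (k : Int) (hk : 0 ≤ k) (r : Nat)
    (hr : r ≤ nums.length - 1) :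
    (PySem.List.pyRange 1 ((r:Int)+1) 1).foldl (pvStepA nums k) (PySem.Set.empty, 1, 0)
      = (pvTag nums k.toNat r, pvResA nums k.toNat r, (pvLo nums k.toNat r : Int)) := by
  induction r with
  | zero =>
    rw [PySem.List.pyRange_one_eq_nil (by norm_num)]
    simp [pvTag, pvResA, pvLo, pvC, pvBsr, pvP, PySem.Set.empty]
  | succ r ih =>
    rw [show ((r+1:Nat):Int)+1 = (((r:Nat):Int)+1)+1 by push_cast; ring,
      PySem.List.pyRange_one_succ_right (by omega), List.foldl_append, ih (by omega)]
    simpa using pv_stepA_eq nums k hk r hr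

theorem pvResA_eq (nums : List Int) (k : Int) (hk : 0 ≤ k) (hn : 1 ≤ nums.length)
    (r : Nat) (hr : r ≤ nums.length - 1) :
    pvResA nums k.toNat r
      = max (pvWP (pvBsr nums (nums.length - 1)) nums.length k.toNat (pvC nums r))
          ((r:Int) - (pvLo nums k.toNat r : Int) + 1) := by
  induction r with
  | zero =>
    have hc0 : pvC nums 0 = 0 := rfl
    have hlo0 : pvLo nums k.toNat 0 = 0 := by
      unfold pvLo pvP pvC pvBsr
      simp
    rw [hc0, hlo0, show pvResA nums k.toNat 0 = 1 from rfl,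
      show pvWP (pvBsr nums (nums.length - 1)) nums.length k.toNat 0 = 1 from rfl]
    norm_num
  | succ r ih =>
    rw [show pvResA nums k.toNat (r+1) = max (pvResA nums k.toNat r)
          (((r:Int)+1) - (pvLo nums k.toNat (r+1) : Int) + 1) from rfl, ih (by omega)]
    by_cases hb : pvT nums r = true
    · have hbsr : pvBsr nums (r+1) = pvBsr nums r ++ [r] := by rw [pvBsr_succ]; simp [hb]
      have hC1 : pvC nums (r+1) = pvC nums r + 1 := by simp [pvC, hbsr]
      have hle : pvC nums (r+1) ≤ (pvBsr nums (nums.length - 1)).length :=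
        pvC_mono nums (by omega)
      have hgd : (pvBsr nums (nums.length - 1)).getD (pvC nums r) 0 = r := by
        rw [pvBsr_getD nums (show r+1 ≤ nums.length - 1 by omega) (by omega),
          pvBsr_getD_last nums hb]
      have hWcr : pvW (pvBsr nums (nums.length - 1)) nums.length k.toNat (pvC nums r)
          = (r:Int) - (pvLo nums k.toNat r : Int) + 1 := by
        unfold pvW pvE
        rw [if_neg (by omega), hgd,
          pvP_agree nums (show r ≤ nums.length - 1 by omega) (by omega)]
        rfl
      rw [hC1, show pvWP (pvBsr nums (nums.length - 1)) nums.length k.toNat (pvC nums r + 1)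
            = max (pvWP (pvBsr nums (nums.length - 1)) nums.length k.toNat (pvC nums r))
                (pvW (pvBsr nums (nums.length - 1)) nums.length k.toNat (pvC nums r)) from rfl,
        hWcr]
      omega
    · have hbsr : pvBsr nums (r+1) = pvBsr nums r := by rw [pvBsr_succ]; simp [hb]
      have hC1 : pvC nums (r+1) = pvC nums r := by simp [pvC, hbsr]
      have hlo1 : pvLo nums k.toNat (r+1) = pvLo nums k.toNat r := by
        unfold pvLo pvC; rw [hbsr]
      rw [hC1, hlo1]
      omega

theorem pvA_closed (nums : List Int) (k : Int) (hk : 0 ≤ k) (hne : nums ≠ []) :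
    maximumLength_removed nums k
      = pvWP (pvBsr nums (nums.length - 1)) nums.length k.toNat
          (pvC nums (nums.length - 1) + 1) := by
  have hn : 1 ≤ nums.length := by
    cases nums with
    | nil => exact absurd rfl hne
    | cons a l => simp
  unfold maximumLength_removed
  rw [if_neg hne, show (nums.length : Int) = ((nums.length - 1 : Nat) : Int) + 1 by omega,
    pv_loopA_inv nums k hk (nums.length - 1) le_rfl]
  dsimp only
  rw [pvResA_eq nums k hk hn (nums.length - 1) le_rfl]
  have hterm : ((nums.length - 1 : Nat) : Int)
        - (pvLo nums k.toNat (nums.length - 1) : Int) + 1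
      = pvW (pvBsr nums (nums.length - 1)) nums.length k.toNat (pvC nums (nums.length - 1)) := by
    unfold pvW pvE pvLo
    rw [if_pos (show pvC nums (nums.length - 1) = (pvBsr nums (nums.length - 1)).length
      from rfl)]
  rw [hterm, show pvWP (pvBsr nums (nums.length - 1)) nums.length k.toNat
        (pvC nums (nums.length - 1) + 1)
      = max (pvWP (pvBsr nums (nums.length - 1)) nums.length k.toNat (pvC nums (nums.length - 1)))
          (pvW (pvBsr nums (nums.length - 1)) nums.length k.toNat (pvC nums (nums.length - 1)))
      from rfl]

theorem pv_loopB_inv (nums : List Int) (r : Nat) (hr : r ≤ nums.length - 1) :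
    (PySem.List.pyRange 1 ((r:Int)+1) 1).foldl (pvStepRuns nums) ([], 1)
      = ((List.range (pvC nums r)).map (pvRL (pvBsr nums r) nums.length),
         (r:Int) - (pvP (pvBsr nums r) (pvC nums r) : Int) + 1) := by
  induction r with
  | zero =>
    rw [PySem.List.pyRange_one_eq_nil (by norm_num)]
    norm_num [pvC, pvBsr, pvP]
  | succ r ih =>
    rw [show ((r+1:Nat):Int)+1 = (((r:Nat):Int)+1)+1 by push_cast; ring,
      PySem.List.pyRange_one_succ_right (by omega), List.foldl_append, ih (by omega)]
    simp only [List.foldl_cons, List.foldl_nil, pvStepRuns]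
    rw [show (r:Int)+1-1 = (r:Int) by ring]
    by_cases hb : pvT nums r = true
    · have hcond : ¬ (PySem.List.pyGet? nums ((r:Int)+1) = PySem.List.pyGet? nums (r:Int)) := by
        simpa [pvT] using hb
      rw [if_neg hcond]
      have hbsr : pvBsr nums (r+1) = pvBsr nums r ++ [r] := by rw [pvBsr_succ]; simp [hb]
      have hC : pvC nums (r+1) = pvC nums r + 1 := by simp [pvC, hbsr]
      have hgetD := pvBsr_getD_last nums hb
      have hPend : pvP (pvBsr nums (r+1)) (pvC nums r + 1) = r + 1 := by
        unfold pvP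
        simp only [Nat.succ_ne_zero, if_false, Nat.add_sub_cancel]
        rw [hgetD]
      have hmapc : (List.range (pvC nums r)).map (pvRL (pvBsr nums (r+1)) nums.length)
          = (List.range (pvC nums r)).map (pvRL (pvBsr nums r) nums.length) := by
        apply List.map_congr_left
        intro j hjr
        exact pvRL_agree nums nums.length (by omega) (List.mem_range.1 hjr)
      have hlast : pvRL (pvBsr nums (r+1)) nums.length (pvC nums r)
          = (r:Int) - (pvP (pvBsr nums r) (pvC nums r) : Int) + 1 := by
        unfold pvRL pvE
        rw [if_neg (show pvC nums r ≠ (pvBsr nums (r+1)).length by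
              have : pvC nums (r+1) = (pvBsr nums (r+1)).length := rfl; omega),
            hgetD, pvP_agree nums (Nat.le_succ r) (le_refl _)]
      rw [hC, List.range_succ, List.map_append, hmapc, List.map_singleton, hlast, hPend]
      refine Prod.ext rfl ?_
      push_cast
      ring
    · have hcond : (PySem.List.pyGet? nums ((r:Int)+1) = PySem.List.pyGet? nums (r:Int)) := by
        simpa [pvT] using hb
      rw [if_pos hcond]
      have hbsr : pvBsr nums (r+1) = pvBsr nums r := by rw [pvBsr_succ]; simp [hb]
      have hC : pvC nums (r+1) = pvC nums r := by simp [pvC, hbsr]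
      rw [hC, hbsr]
      refine Prod.ext rfl ?_
      push_cast
      ring

theorem pvP_succ_eq (bs : List Nat) (n : Nat) {j : Nat} (hj : j < bs.length) :
    pvP bs (j+1) = pvE bs n j + 1 := by
  unfold pvP pvE
  simp only [Nat.succ_ne_zero, if_false, Nat.add_sub_cancel]
  rw [if_neg (by omega)]

theorem pvP_le_pvE (bs : List Nat) (n : Nat) (hs : bs.Pairwise (· < ·))
    (hlt : ∀ x ∈ bs, x < n - 1) : ∀ j ≤ bs.length, pvP bs j ≤ pvE bs n j := by
  intro j hj
  unfold pvP pvE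
  cases j with
  | zero => simp
  | succ j =>
    have hjlen : j < bs.length := by omega
    simp only [Nat.succ_ne_zero, if_false, Nat.add_sub_cancel]
    by_cases hj1 : j + 1 = bs.length
    · rw [if_pos hj1]
      have hmem : bs.getD j 0 < n - 1 := by
        rw [List.getD_eq_getElem _ _ hjlen]; exact hlt _ (List.getElem_mem hjlen)
      omega
    · rw [if_neg hj1]
      have h2 : j + 1 < bs.length := by omega
      have h3 := List.pairwise_iff_getElem.1 hs j (j+1) hjlen h2 (by omega)
      rw [List.getD_eq_getElem _ _ hjlen, List.getD_eq_getElem _ _ h2]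
      omega

theorem pvIfMax (a b : Int) : (if a > b then a else b) = max b a := by
  by_cases h : a > b <;> simp [h] <;> omega

theorem pvRL_ge_one (bs : List Nat) (n : Nat) (hs : bs.Pairwise (· < ·))
    (hlt : ∀ x ∈ bs, x < n - 1) {j : Nat} (hj : j ≤ bs.length) : 1 ≤ pvRL bs n j := by
  have h := pvP_le_pvE bs n hs hlt j hj
  unfold pvRL
  omega

theorem pv_loopBest (nums : List Int) (k : Int) (hk : 0 ≤ k) (hn : 1 ≤ nums.length)
    (j : Nat) (hj : j ≤ (pvBsr nums (nums.length - 1)).length) :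
    (PySem.List.pyRange 0 ((j:Int)+1) 1).foldl
        (pvStepBest ((List.range ((pvBsr nums (nums.length - 1)).length + 1)).map
          (pvRL (pvBsr nums (nums.length - 1)) nums.length)) k) (0, 0)
      = (pvW (pvBsr nums (nums.length - 1)) nums.length k.toNat j,
         pvWP (pvBsr nums (nums.length - 1)) nums.length k.toNat (j+1)) := by
  set bs := pvBsr nums (nums.length - 1) with hbs
  set n := nums.length with hn'
  have hs : bs.Pairwise (· < ·) := pvBsr_pairwise nums (n - 1)
  have hlt : ∀ x ∈ bs, x < n - 1 := fun x hx => pvBsr_lt hx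
  have hkk : (k.toNat : Int) = k := Int.toNat_of_nonneg hk
  induction j with
  | zero =>
    rw [show ((0:Nat):Int)+1 = (0:Int)+1 by norm_num, PySem.List.pyRange_one_singleton]
    simp only [List.foldl_cons, List.foldl_nil, pvStepBest]
    rw [PySem.List.pyGetD_zero, PySem.List.getD_map_range _ _ _ _ (by omega),
      if_neg (show ¬ ((0:Int) > k) by omega)]
    have hRL := pvRL_ge_one bs n hs hlt (show 0 ≤ bs.length by omega)
    rw [if_pos (by omega)]
    have hW0 : pvW bs n k.toNat 0 = pvRL bs n 0 := by
      unfold pvW pvRL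
      rw [Nat.zero_sub]
    have hWP1 : pvWP bs n k.toNat 1 = pvW bs n k.toNat 0 := by
      show max (pvWP bs n k.toNat 0) (pvW bs n k.toNat 0) = pvW bs n k.toNat 0
      have h0 : pvWP bs n k.toNat 0 = 1 := rfl
      rw [hW0]
      omega
    refine Prod.ext ?_ ?_
    · rw [hW0]; ring
    · rw [hWP1, hW0]; ring
  | succ j ih =>
    have hjlt : j < bs.length := by omega
    rw [show ((j+1:Nat):Int)+1 = (((j:Nat):Int)+1)+1 by push_cast; ring,
      PySem.List.pyRange_one_succ_right (by omega), List.foldl_append, ih (by omega)]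
    simp only [List.foldl_cons, List.foldl_nil, pvStepBest]
    rw [show (j:Int)+1 = ((j+1:Nat):Int) by push_cast; ring, PySem.List.pyGetD_natCast,
      PySem.List.getD_map_range _ _ _ _ (by omega)]
    have h1 := pvP_succ_eq bs n hjlt
    by_cases hjk : ((j+1:Nat):Int) > k
    · have hkj : k.toNat ≤ j := by omega
      rw [if_pos hjk]
      rw [show ((j+1:Nat):Int) - k - 1 = ((j - k.toNat : Nat):Int) by push_cast [hkj]; omega,
        PySem.List.pyGetD_natCast, PySem.List.getD_map_range _ _ _ _ (by omega)]
      have h2 := pvP_succ_eq bs n (show j - k.toNat < bs.length by omega)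
      have hW : pvW bs n k.toNat (j+1)
          = pvW bs n k.toNat j + pvRL bs n (j+1) - pvRL bs n (j - k.toNat) := by
        unfold pvW pvRL
        rw [show (j+1) - k.toNat = (j - k.toNat) + 1 from by omega, h1, h2]
        push_cast
        ring
      rw [← hW, pvIfMax]
      rfl
    · have hkj : j + 1 ≤ k.toNat := by omega
      rw [if_neg hjk]
      have hW : pvW bs n k.toNat (j+1) = pvW bs n k.toNat j + pvRL bs n (j+1) := by
        unfold pvW pvRL
        rw [show (j+1) - k.toNat = 0 from by omega, show j - k.toNat = 0 from by omega, h1]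
        have hP0 : pvP bs 0 = 0 := rfl
        rw [hP0]
        push_cast
        ring
      rw [← hW, pvIfMax]
      rfl

theorem pvB_closed (nums : List Int) (k : Int) (hk : 0 ≤ k) (hne : nums ≠ []) :
    maximumLength_removed_alt nums k
      = pvWP (pvBsr nums (nums.length - 1)) nums.length k.toNat
          ((pvBsr nums (nums.length - 1)).length + 1) := by
  have hn : 1 ≤ nums.length := by
    cases nums with
    | nil => exact absurd rfl hne
    | cons a l => simp
  unfold maximumLength_removed_alt
  rw [if_neg hne]
  dsimp only
  have hcast : (nums.length : Int) = ((nums.length - 1 : Nat) : Int) + 1 := by omega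
  rw [hcast, pv_loopB_inv nums (nums.length - 1) le_rfl]
  have hC : pvC nums (nums.length - 1) = (pvBsr nums (nums.length - 1)).length := rfl
  have hs : (pvBsr nums (nums.length - 1)).Pairwise (· < ·) :=
    pvBsr_pairwise nums (nums.length - 1)
  have hlt : ∀ x ∈ pvBsr nums (nums.length - 1), x < nums.length - 1 :=
    fun x hx => pvBsr_lt hx
  have hlast : ((nums.length - 1 : Nat) : Int)
        - (pvP (pvBsr nums (nums.length - 1)) (pvC nums (nums.length - 1)) : Int) + 1
      = pvRL (pvBsr nums (nums.length - 1)) nums.length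
          ((pvBsr nums (nums.length - 1)).length) := by
    unfold pvRL pvE
    rw [if_pos rfl, hC]
  rw [hlast, hC]
  have hruns : (List.range ((pvBsr nums (nums.length - 1)).length)).map
        (pvRL (pvBsr nums (nums.length - 1)) nums.length)
        ++ [pvRL (pvBsr nums (nums.length - 1)) nums.length
              ((pvBsr nums (nums.length - 1)).length)]
      = (List.range ((pvBsr nums (nums.length - 1)).length + 1)).map
          (pvRL (pvBsr nums (nums.length - 1)) nums.length) := by
    rw [List.range_succ, List.map_append, List.map_singleton]
  rw [hruns]
  have hlen : ((List.range ((pvBsr nums (nums.length - 1)).length + 1)).map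
      (pvRL (pvBsr nums (nums.length - 1)) nums.length)).length
      = (pvBsr nums (nums.length - 1)).length + 1 := by
    rw [List.length_map, List.length_range]
  rw [hlen, show (((pvBsr nums (nums.length - 1)).length + 1 : Nat) : Int)
      = (((pvBsr nums (nums.length - 1)).length : Nat) : Int) + 1 by push_cast; ring,
    pv_loopBest nums k hk hn _ le_rfl]

-- ===== VERDICT (by name: the statement is the Claim_ definition above) =====
theorem maximumLength_removed_spec : Claim_equal_maximumLength_removed := by
  intro nums k _ hpre
  unfold Spec_maximumLength_removed
  by_cases hne : nums = []
  · subst hne; rfl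
  · rw [pvA_closed nums k hpre hne, pvB_closed nums k hpre hne]
    rfl
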